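-- pv_equiv track=rewrite | github.com/alan22345/auto-agent | agent/graph_analyzer/pipeline.py | _file_to_module
-- ===== SOURCE A (Python) =====
-- def _file_to_module(file_path: str) -> str | None:
--     """Convert a workspace-relative file path into its dotted module form.
--
--     ``a/b/c.py`` → ``a.b.c``. ``a/b/__init__.py`` → ``a.b``.
--     TypeScript files (``.ts`` / ``.tsx``) are converted the same way
--     (``frontend/mod.ts`` → ``frontend.mod``) — the parser uses the same
--     encoding when emitting synthetic ``module:`` ids.
--
--     Returns ``None`` for files with no recognised extension; callers
--     then skip the lookup for that node.
--     """
--     for ext in (".py", ".tsx", ".ts", ".jsx", ".js"):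
--         if file_path.endswith(ext):
--             stem = file_path[: -len(ext)]
--             parts = stem.split("/")
--             if parts and parts[-1] == "__init__":
--                 parts = parts[:-1]
--             return ".".join(parts)
--     return None
-- ===== SOURCE B (Python) =====
-- def _file_to_module(file_path: str) -> str | None:
--     stem, dot, ext = file_path.rpartition(".")
--     if not dot or ext not in ("py", "tsx", "ts", "jsx", "js"):
--         return None
--     if stem == "__init__":
--         return ""
--     if stem.endswith("/__init__"):
--         stem = stem[:-9]
--     return "".join("." if c == "/" else c for c in stem)
-- ===== Notes on version B (the rewrite author's own statement) =====
-- stated objective: alternative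
-- what changed: B never builds a parts list: it rpartitions off the tail after the last dot, tests it once against the five extension names, strips a trailing package-init component by string-suffix arithmetic, and converts separators with a single character-level translation instead of A's endswith loop plus split/pop/join.
import Mathlib
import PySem

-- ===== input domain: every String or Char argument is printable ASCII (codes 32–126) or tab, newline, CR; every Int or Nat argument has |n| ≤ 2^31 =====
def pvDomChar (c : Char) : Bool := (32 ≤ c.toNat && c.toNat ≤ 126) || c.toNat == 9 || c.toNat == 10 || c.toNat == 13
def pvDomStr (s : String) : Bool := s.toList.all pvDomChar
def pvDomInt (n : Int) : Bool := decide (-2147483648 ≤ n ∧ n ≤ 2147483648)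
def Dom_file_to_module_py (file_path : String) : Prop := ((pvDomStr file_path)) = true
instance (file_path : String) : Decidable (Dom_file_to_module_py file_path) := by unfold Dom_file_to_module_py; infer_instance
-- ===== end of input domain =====

-- B avoids A's endswith loop and parts list entirely: it rpartitions off the tail after the
-- last dot, tests that tail once against the five extension names, strips a trailing
-- package-init component by string-suffix arithmetic, and converts '/' to '.' by a single
-- character-level translation instead of split/pop/join. (alternative)

-- ===== PORT A =====
-- A's loop 'for ext in (".py", ".tsx", ".ts", ".jsx", ".js"): if file_path.endswith(ext): …'
def fileToModLoopA (file_path : String) : List String → Option String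
  | [] => none
  | ext :: rest =>
    if PySem.Str.endswith file_path ext then
      let stem := PySem.Str.slice file_path none (some (-(PySem.Str.len ext : Int)))
      let parts := (PySem.Str.split? stem "/").getD []
      let parts := if parts ≠ [] ∧ PySem.List.pyGet? parts (-1) = some "__init__" then
          PySem.List.slice parts none (some (-1)) else parts
      some (PySem.Str.join "." parts)
    else fileToModLoopA file_path rest

def file_to_module_py (file_path : String) : Option String :=
  fileToModLoopA file_path [".py", ".tsx", ".ts", ".jsx", ".js"]

-- ===== PORT B =====
-- Python's str.rpartition for the one-char separator ".": the pieces around the LAST dot,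
-- (s[:i], ".", s[i+1:]) at i = s.rfind("."), or ("", "", s) with no dot — ported by hand, exact.
def pyRpartitionDot (s : String) : String × String × String :=
  let i := PySem.Str.rfind s "."
  if i = -1 then ("", "", s)
  else (PySem.Str.slice s none (some i), ".", PySem.Str.slice s (some (i + 1)) none)

def file_to_module_py_alt (file_path : String) : Option String :=
  match pyRpartitionDot file_path with
  | (stem, dot, ext) =>
    if dot = "" ∨ ext ∉ (["py", "tsx", "ts", "jsx", "js"] : List String) then none
    else if stem = "__init__" then some ""
    else
      let stem := if PySem.Str.endswith stem "/__init__" then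
          PySem.Str.slice stem none (some (-9)) else stem
      -- '"".join("." if c == "/" else c for c in stem)': character-wise translation, exact
      some (String.ofList (stem.toList.map (fun c => if c = '/' then '.' else c)))

-- ===== PRECONDITION & SPEC =====
def Spec_file_to_module_py (file_path : String) (out : Option String) : Prop := out = file_to_module_py_alt file_path
instance (file_path : String) (out : Option String) : Decidable (Spec_file_to_module_py file_path out) := by unfold Spec_file_to_module_py; infer_instance

-- ===== CLAIM (what is proved, stated in full; the proofs are below) =====
def Claim_equal_file_to_module_py : Prop := ∀ (file_path : String), Dom_file_to_module_py file_path → Spec_file_to_module_py file_path (file_to_module_py file_path)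

-- ===== LEMMAS AND PROOFS =====

-- rfind.go scans indices length, length-1, …, 0 for the last prefix occurrence
theorem pvRfindGo_spec (s sub : List Char) (j : Nat) :
    (PySem.Chars.rfind.go s sub j = -1 ∧ ∀ m ≤ j, ¬ sub <+: s.drop m) ∨
    (∃ m : Nat, PySem.Chars.rfind.go s sub j = (m : Int) ∧ m ≤ j ∧ sub <+: s.drop m ∧
      ∀ k, m < k → k ≤ j → ¬ sub <+: s.drop k) := by
  induction j with
  | zero =>
    by_cases h : sub <+: s
    · right; exact ⟨0, by simp [PySem.Chars.rfind.go, List.isPrefixOf_iff_prefix, h], le_refl 0, by simpa using h, by omega⟩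
    · left
      refine ⟨by simp [PySem.Chars.rfind.go, List.isPrefixOf_iff_prefix, h], ?_⟩
      intro m hm; interval_cases m; simpa using h
  | succ j ih =>
    by_cases h : sub <+: s.drop (j+1)
    · right
      exact ⟨j+1, by simp [PySem.Chars.rfind.go, List.isPrefixOf_iff_prefix, h], le_refl _, h,
        fun k hk1 hk2 => by omega⟩
    · have hstep : PySem.Chars.rfind.go s sub (j+1) = PySem.Chars.rfind.go s sub j := by
        simp [PySem.Chars.rfind.go, List.isPrefixOf_iff_prefix, h]
      rcases ih with ⟨h1, h2⟩ | ⟨m, h1, h2, h3, h4⟩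
      · left
        refine ⟨by rw [hstep]; exact h1, fun m hm => ?_⟩
        rcases Nat.lt_or_ge m (j+1) with hlt | hge
        · exact h2 m (by omega)
        · have : m = j+1 := by omega
          subst this; exact h
      · right
        refine ⟨m, by rw [hstep]; exact h1, by omega, h3, fun k hk1 hk2 => ?_⟩
        rcases Nat.lt_or_ge k (j+1) with hlt | hge
        · exact h4 k hk1 (by omega)
        · have : k = j+1 := by omega
          subst this; exact h

theorem pvExistsPrefixDrop {L : List Char} (h : '.' ∈ L) :
    ∃ m ≤ L.length, ['.'] <+: L.drop m := by
  obtain ⟨p, q, rfl⟩ := List.append_of_mem h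
  refine ⟨p.length, by simp, ?_⟩
  rw [List.drop_left]; exact ⟨q, rfl⟩

-- a candidate suffix '.'::t (no further dot in t) ends the string iff it is exactly
-- the tail from the last dot
theorem pvEndswithChar {L : List Char} {i : Nat}
    (hi : ['.'] <+: L.drop i)
    (hmax : ∀ k, i < k → k ≤ L.length → ¬ ['.'] <+: L.drop k)
    {t : List Char} (ht : '.' ∉ t) :
    ('.'::t) <:+ L ↔ L.drop i = '.'::t := by
  constructor
  · rintro ⟨p, rfl⟩
    have hpi : p.length ≤ i := by
      by_contra hgt
      exact hmax p.length (by omega) (by simp)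
        (by rw [List.drop_left]; exact ⟨t, rfl⟩)
    have heq : p.length = i := by
      by_contra hne
      have hsplit : (p ++ '.'::t).drop i = t.drop (i - p.length - 1) := by
        rw [List.drop_append]
        rw [List.drop_eq_nil_of_le (by omega), List.nil_append]
        have h2 : i - p.length = (i - p.length - 1) + 1 := by omega
        rw [h2, List.drop_succ_cons]
        simp
      rw [hsplit] at hi
      exact ht (List.mem_of_mem_drop (hi.subset (List.mem_singleton_self _)))
    rw [← heq, List.drop_left]
  · intro h
    rw [← h]; exact List.drop_suffix i L

-- the two stem slices coincide when the extension has length k = |L| - i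
theorem pvStemEq (fp : String) (i : Nat) (k : Int) (hk : 0 < k)
    (hlen : (fp.toList.length : Int) - i = k) :
    PySem.Str.slice fp none (some (-k)) = PySem.Str.slice fp none (some (i : Int)) := by
  apply String.toList_inj.mp
  have hknat : k = ((k.toNat : Nat) : Int) := (Int.toNat_of_nonneg (le_of_lt hk)).symm
  rw [hknat, PySem.Str.toList_slice, PySem.Str.toList_slice, PySem.Chars.slice_eq_listSlice,
    PySem.Chars.slice_eq_listSlice, PySem.List.slice_to_neg_natCast _ _ (by omega),
    PySem.List.slice_to_natCast]
  congr 1; omega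

-- xs[-1] on a nonempty list is its last element
theorem pvGetNeg1 {α : Type} (xs : List α) (h : xs ≠ []) :
    PySem.List.pyGet? xs (-1) = xs.getLast? := by
  have hl : 0 < xs.length := List.length_pos_iff.mpr h
  simp only [PySem.List.pyGet?, PySem.List.pyIdx?]
  rw [if_neg (by omega), if_pos (by omega)]
  show xs[xs.length - (-(-1:Int)).toNat]? = xs.getLast?
  rw [List.getLast?_eq_getElem?]
  simp

-- reference form of '/'-splitting, structural on the characters
def pvSplit : List Char → List (List Char)
  | [] => [[]]
  | c :: r => if c = '/' then [] :: pvSplit r else (pvSplit r).modifyHead (c :: ·)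

theorem pvSplit_ne_nil (l : List Char) : pvSplit l ≠ [] := by
  induction l with
  | nil => simp [pvSplit]
  | cons c r ih =>
    rw [pvSplit]
    split_ifs
    · simp
    · cases h : pvSplit r with
      | nil => exact absurd h ih
      | cons a t => simp

theorem pvSplitGo (l : List Char) : ∀ (fuel : Nat) (cur : List Char) (acc : List (List Char)),
    l.length < fuel →
    PySem.Chars.splitOn.go ['/'] fuel l cur acc =
      acc.reverse ++ (pvSplit l).modifyHead (cur.reverse ++ ·) := by
  induction l with
  | nil =>
    intro fuel cur acc hf
    cases fuel with
    | zero => omega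
    | succ f => simp [PySem.Chars.splitOn.go, pvSplit]
  | cons c r ih =>
    intro fuel cur acc hf
    cases fuel with
    | zero => omega
    | succ f =>
      by_cases hc : c = '/'
      · subst hc
        rw [show PySem.Chars.splitOn.go ['/'] (f+1) ('/'::r) cur acc =
            PySem.Chars.splitOn.go ['/'] f (List.drop 1 ('/'::r)) [] (cur.reverse :: acc) from by
          simp [PySem.Chars.splitOn.go, List.isPrefixOf]]
        rw [List.drop_succ_cons, List.drop_zero, ih f [] _ (by simp at hf ⊢; omega)]
        cases h : pvSplit r with
        | nil => exact absurd h (pvSplit_ne_nil r)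
        | cons a t => simp [pvSplit, h]
      · rw [show PySem.Chars.splitOn.go ['/'] (f+1) (c::r) cur acc =
            PySem.Chars.splitOn.go ['/'] f r (c :: cur) acc from by
          simp [PySem.Chars.splitOn.go, List.isPrefixOf]
          exact fun h => absurd h.symm hc]
        rw [ih f (c :: cur) acc (by simp at hf ⊢; omega)]
        cases h : pvSplit r with
        | nil => exact absurd h (pvSplit_ne_nil r)
        | cons a t => simp [pvSplit, hc, h]

theorem pvSplitOn (l : List Char) : PySem.Chars.splitOn l ['/'] = pvSplit l := by
  rw [PySem.Chars.splitOn, pvSplitGo l (l.length + 1) [] [] (by omega)]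
  cases h : pvSplit l with
  | nil => exact absurd h (pvSplit_ne_nil l)
  | cons a t => simp

theorem pvParts (st : String) :
    (PySem.Str.split? st "/").getD [] = (pvSplit st.toList).map String.ofList := by
  have h : ("/" : String).toList = ['/'] := rfl
  rw [PySem.Str.split?, PySem.Chars.split?, h]
  simp [pvSplitOn]

theorem pvJoinCons (c : Char) (h : List Char) (t : List (List Char)) :
    PySem.Chars.join ['.'] ((c::h)::t) = c :: PySem.Chars.join ['.'] (h::t) := by
  cases t with
  | nil => rw [PySem.Chars.join_singleton, PySem.Chars.join_singleton]
  | cons q r =>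
    rw [PySem.Chars.join_cons_cons, PySem.Chars.join_cons_cons]
    simp

theorem pvJoinSplit (l : List Char) :
    PySem.Chars.join ['.'] (pvSplit l) = l.map (fun c => if c = '/' then '.' else c) := by
  induction l with
  | nil => simp [pvSplit, PySem.Chars.join_singleton]
  | cons c r ih =>
    by_cases hc : c = '/'
    · subst hc
      rw [show pvSplit ('/'::r) = [] :: pvSplit r from by rw [pvSplit, if_pos rfl]]
      cases h : pvSplit r with
      | nil => exact absurd h (pvSplit_ne_nil r)
      | cons a t =>
        rw [PySem.Chars.join_cons_cons]
        rw [h] at ih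
        simp [ih]
    · rw [pvSplit, if_neg hc]
      cases h : pvSplit r with
      | nil => exact absurd h (pvSplit_ne_nil r)
      | cons a t =>
        rw [h] at ih
        simp only [List.modifyHead, pvJoinCons, ih]
        simp [hc]

theorem pvNoSlash (s : List Char) (h : '/' ∉ s) : pvSplit s = [s] := by
  induction s with
  | nil => rfl
  | cons c r ih =>
    have hc : c ≠ '/' := fun hc => h (hc ▸ List.mem_cons_self)
    rw [pvSplit, if_neg hc, ih (fun hm => h (List.mem_cons_of_mem _ hm))]
    rfl

theorem pvSplitAppend (p s : List Char) (h : '/' ∉ s) :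
    pvSplit (p ++ '/'::s) = pvSplit p ++ [s] := by
  induction p with
  | nil => simp [pvSplit, pvNoSlash s h]
  | cons c p' ih =>
    by_cases hc : c = '/'
    · subst hc
      simp only [List.cons_append, pvSplit, ih]
      rfl
    · simp only [List.cons_append, pvSplit, if_neg hc, ih]
      cases hp : pvSplit p' with
      | nil => exact absurd hp (pvSplit_ne_nil p')
      | cons a t => simp

theorem pvLast (l : List Char) :
    ((pvSplit l).getLast? = some l ∧ '/' ∉ l) ∨
    (∃ p s, l = p ++ '/'::s ∧ '/' ∉ s ∧ (pvSplit l).getLast? = some s) := by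
  induction l with
  | nil => left; exact ⟨rfl, by simp⟩
  | cons c r ih =>
    by_cases hc : c = '/'
    · subst hc
      right
      rcases ih with ⟨hlast, hnos⟩ | ⟨p, s, hl, hs, hlast⟩
      · refine ⟨[], r, rfl, hnos, ?_⟩
        rw [pvSplit, if_pos rfl]
        cases h : pvSplit r with
        | nil => exact absurd h (pvSplit_ne_nil r)
        | cons a t => rw [h] at hlast; simpa using hlast
      · refine ⟨'/'::p, s, by simp [hl], hs, ?_⟩
        rw [pvSplit, if_pos rfl]
        cases h : pvSplit r with
        | nil => exact absurd h (pvSplit_ne_nil r)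
        | cons a t => rw [h] at hlast; simpa using hlast
    · cases hr : pvSplit r with
      | nil => exact absurd hr (pvSplit_ne_nil r)
      | cons a t =>
        have hsl : pvSplit (c::r) = (c::a)::t := by rw [pvSplit, if_neg hc, hr]; rfl
        cases t with
        | nil =>
          rcases ih with ⟨hlast, hnos⟩ | ⟨p, s, hl, hs, hlast⟩
          · rw [hr] at hlast
            have har : a = r := by simpa using hlast
            subst har
            left
            refine ⟨by rw [hsl]; rfl, ?_⟩
            intro hm
            rcases List.mem_cons.mp hm with h1 | h1
            · exact hc h1.symm
            · exact hnos h1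
          · exfalso
            rw [hl, pvSplitAppend p s hs] at hr
            have h2 : (pvSplit p).length + 1 = 1 := by
              simpa using congrArg List.length hr
            have hplen := List.length_pos_iff.mpr (pvSplit_ne_nil p)
            omega
        | cons a2 t2 =>
          rcases ih with ⟨hlast, hnos⟩ | ⟨p, s, hl, hs, hlast⟩
          · exfalso
            rw [pvNoSlash r hnos] at hr
            exact absurd (congrArg List.length hr) (by simp)
          · right
            refine ⟨c::p, s, by simp [hl], hs, ?_⟩
            rw [hsl, List.getLast?_cons_cons]
            rw [hr, List.getLast?_cons_cons] at hlast
            exact hlast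

-- A's split/pop/join of a stem equals B's direct treatment of the same stem
theorem pvTailEq (st : String) :
    PySem.Str.join "."
      (if ((PySem.Str.split? st "/").getD []) ≠ [] ∧
          PySem.List.pyGet? ((PySem.Str.split? st "/").getD []) (-1) = some "__init__" then
        PySem.List.slice ((PySem.Str.split? st "/").getD []) none (some (-1))
      else (PySem.Str.split? st "/").getD []) =
    (if st = "__init__" then "" else
      String.ofList ((if PySem.Str.endswith st "/__init__" then
          PySem.Str.slice st none (some (-9)) else st).toList.map
        (fun c => if c = '/' then '.' else c))) := by
  have hI : ("__init__" : String).toList = ['_','_','i','n','i','t','_','_'] := rfl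
  set I : List Char := ['_','_','i','n','i','t','_','_'] with hIdef
  have hInoslash : '/' ∉ I := by decide
  have hne : (pvSplit st.toList).map String.ofList ≠ [] := by
    simp [List.map_eq_nil_iff, pvSplit_ne_nil]
  have hget : PySem.List.pyGet? ((pvSplit st.toList).map String.ofList) (-1)
      = ((pvSplit st.toList).getLast?).map String.ofList := by
    rw [pvGetNeg1 _ hne, List.getLast?_map]
  have hcond : (((pvSplit st.toList).getLast?).map String.ofList = some "__init__")
      ↔ (pvSplit st.toList).getLast? = some I := by
    constructor
    · intro h
      rcases Option.map_eq_some_iff.mp h with ⟨x, hx, hofl⟩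
      have : x = I := by
        have := congrArg String.toList hofl
        rwa [String.toList_ofList, hI] at this
      rw [hx, this]
    · intro h
      rw [h]
      rfl
  have hstI : st = "__init__" ↔ st.toList = I := by
    constructor
    · intro h; rw [h, hI]
    · intro h; apply String.toList_inj.mp; rw [h, hI]
  have hsuf : PySem.Str.endswith st "/__init__" = true ↔ ('/'::I) <:+ st.toList := by
    have h9 : ("/__init__" : String).toList = '/'::I := rfl
    rw [show PySem.Str.endswith st "/__init__" = PySem.Chars.endswith st.toList ('/'::I) from by
      rw [PySem.Str.endswith, h9]]
    exact PySem.Chars.endswith_iff _ _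
  have hcomp : (String.toList ∘ String.ofList) = (id : List Char → List Char) := by
    funext x; simp [String.toList_ofList]
  rw [pvParts]
  by_cases hIcase : st.toList = I
  · have hsplitI : pvSplit st.toList = [I] := by rw [hIcase]; exact pvNoSlash I hInoslash
    rw [if_pos ⟨hne, by rw [hget, hcond, hsplitI]; rfl⟩, if_pos (hstI.mpr hIcase)]
    rw [hsplitI, PySem.List.slice_to_neg_one]
    apply String.toList_inj.mp
    rw [PySem.Str.toList_join]
    rfl
  · by_cases hSufCase : ('/'::I) <:+ st.toList
    · obtain ⟨p, hp⟩ := hSufCase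
      have hsplitA : pvSplit st.toList = pvSplit p ++ [I] := by
        rw [← hp]; exact pvSplitAppend p I hInoslash
      have hlen : st.toList.length = p.length + 9 := by
        rw [← hp]; simp [hIdef]
      have htake : (st.toList.take (p.length + 9 - 9)) = p := by
        rw [← hp]; simp
      rw [if_pos ⟨hne, by rw [hget, hcond, hsplitA, List.getLast?_concat]⟩,
        if_neg (fun h => hIcase (hstI.mp h))]
      rw [hsplitA, List.map_append, PySem.List.slice_to_neg_one]
      simp only [List.map_cons, List.map_nil]
      rw [List.dropLast_concat]
      apply String.toList_inj.mp
      rw [PySem.Str.toList_join, List.map_map, hcomp, List.map_id]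
      simp only [String.toList_ofList]
      rw [if_pos (hsuf.mpr ⟨p, hp⟩), PySem.Str.toList_slice, PySem.Chars.slice_eq_listSlice,
        show (some (-9 : Int)) = some (-((9 : Nat) : Int)) from by norm_num,
        PySem.List.slice_to_neg_natCast _ 9 (by norm_num), hlen, htake]
      exact pvJoinSplit p
    · have hlastne : ¬ ((pvSplit st.toList).getLast? = some I) := by
        intro h
        rcases pvLast st.toList with ⟨hlast, _⟩ | ⟨p, s, hl, _, hlast⟩
        · rw [hlast] at h
          exact hIcase (Option.some.inj h)
        · rw [hlast] at h
          have := Option.some.inj h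
          subst this
          exact hSufCase ⟨p, hl.symm⟩
      have hends : PySem.Str.endswith st "/__init__" = false := by
        rw [Bool.eq_false_iff]
        intro h
        exact hSufCase (hsuf.mp h)
      rw [if_neg (fun hcc => hlastne (hcond.mp (hget ▸ hcc.2))),
        if_neg (fun h => hIcase (hstI.mp h)),
        if_neg (show ¬(PySem.Str.endswith st "/__init__" = true) from by rw [hends]; simp)]
      apply String.toList_inj.mp
      rw [PySem.Str.toList_join, List.map_map, hcomp, List.map_id]
      simp only [String.toList_ofList]
      exact pvJoinSplit st.toList

-- the body of A's loop when the extension matches, as a named value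
def pvAStep (fp ext : String) : Option String :=
  let stem := PySem.Str.slice fp none (some (-(PySem.Str.len ext : Int)))
  let parts := (PySem.Str.split? stem "/").getD []
  let parts := if parts ≠ [] ∧ PySem.List.pyGet? parts (-1) = some "__init__" then
      PySem.List.slice parts none (some (-1)) else parts
  some (PySem.Str.join "." parts)

theorem pvLoopTrue (fp ext : String) (rest : List String)
    (h : PySem.Str.endswith fp ext = true) :
    fileToModLoopA fp (ext::rest) = pvAStep fp ext := by
  have h' : PySem.Chars.endswith fp.toList ext.toList = true := h
  simp [fileToModLoopA, pvAStep, h']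

theorem pvLoopFalse (fp ext : String) (rest : List String)
    (h : PySem.Str.endswith fp ext = false) :
    fileToModLoopA fp (ext::rest) = fileToModLoopA fp rest := by
  have h' : PySem.Chars.endswith fp.toList ext.toList = false := h
  simp [fileToModLoopA, h']

-- the matched step of A equals B's non-None branch body at the same stem
theorem pvStepAlt (fp ext st : String)
    (hst : PySem.Str.slice fp none (some (-(PySem.Str.len ext : Int))) = st) :
    pvAStep fp ext =
      if st = "__init__" then some "" else
        some (String.ofList ((if PySem.Str.endswith st "/__init__" then
            PySem.Str.slice st none (some (-9)) else st).toList.map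
          (fun c => if c = '/' then '.' else c))) := by
  simp only [pvAStep]
  rw [hst, pvTailEq st]
  exact apply_ite some _ _ _

-- B's value when the last dot sits at (nonnegative) index i
theorem pvAltOfDot (fp : String) (i : Nat) (h : PySem.Str.rfind fp "." = (i : Int)) :
    file_to_module_py_alt fp =
      (if ("." : String) = "" ∨
          PySem.Str.slice fp (some ((i : Int) + 1)) none ∉ (["py", "tsx", "ts", "jsx", "js"] : List String) then
        none
      else if PySem.Str.slice fp none (some (i : Int)) = "__init__" then some ""
      else
        some (String.ofList ((if PySem.Str.endswith (PySem.Str.slice fp none (some (i : Int))) "/__init__" then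
            PySem.Str.slice (PySem.Str.slice fp none (some (i : Int))) none (some (-9))
          else PySem.Str.slice fp none (some (i : Int))).toList.map
          (fun c => if c = '/' then '.' else c)))) := by
  simp only [file_to_module_py_alt, pyRpartitionDot]
  rw [h, if_neg (show ¬((i : Int) = -1) by omega)]

-- B's value when there is no dot
theorem pvAltNoDot (fp : String) (h : PySem.Str.rfind fp "." = -1) :
    file_to_module_py_alt fp = none := by
  simp only [file_to_module_py_alt, pyRpartitionDot]
  rw [h, if_pos rfl]
  rfl

-- ===== VERDICT (by name: the statement is the Claim_ definition above) =====
theorem file_to_module_py_spec : Claim_equal_file_to_module_py := by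
  intro fp _
  unfold Spec_file_to_module_py file_to_module_py
  have hr : PySem.Str.rfind fp "." = PySem.Chars.rfind.go fp.toList ['.'] fp.toList.length := by
    rw [PySem.Str.rfind_eq]; rfl
  by_cases hmem : '.' ∈ fp.toList
  · -- there is a dot: rfind returns the index i of the last dot
    obtain ⟨m0, hm0le, hm0⟩ := pvExistsPrefixDrop hmem
    rcases pvRfindGo_spec fp.toList ['.'] fp.toList.length with ⟨_, hall⟩ | ⟨i, hgo, hile, hpre, hmax⟩
    · exact absurd hm0 (hall m0 hm0le)
    have hri : PySem.Str.rfind fp "." = (i : Int) := hr.trans hgo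
    rw [pvAltOfDot fp i hri]
    have hdropi : fp.toList.drop i = '.' :: fp.toList.drop (i + 1) := by
      obtain ⟨t, ht⟩ := hpre
      have h1 : fp.toList.drop i = '.' :: t := ht.symm
      have h2 : fp.toList.drop (i + 1) = t := by
        have h3 : List.drop 1 (List.drop i fp.toList) = t := by rw [h1]; rfl
        rw [List.drop_drop] at h3
        exact h3
      rw [h1, h2]
    have hext : (PySem.Str.slice fp (some ((i : Int) + 1)) none).toList = fp.toList.drop (i + 1) := by
      rw [PySem.Str.toList_slice, PySem.Chars.slice_eq_listSlice,
        show ((i : Int) + 1) = (((i + 1 : Nat) : Int)) from by push_cast; ring,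
        PySem.List.slice_from_natCast]
    have hiff : ∀ t : List Char, '.' ∉ t →
        (PySem.Chars.endswith fp.toList ('.'::t) = true ↔ fp.toList.drop i = '.'::t) := by
      intro t ht
      rw [PySem.Chars.endswith_iff]
      exact pvEndswithChar hpre hmax ht
    have hT : ∀ t : List Char, '.' ∉ t → fp.toList.drop i = '.'::t →
        PySem.Chars.endswith fp.toList ('.'::t) = true :=
      fun t ht h => (hiff t ht).mpr h
    have hF : ∀ t : List Char, '.' ∉ t → fp.toList.drop i ≠ '.'::t →
        PySem.Chars.endswith fp.toList ('.'::t) = false :=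
      fun t ht h => Bool.eq_false_iff.mpr (fun hx => h ((hiff t ht).mp hx))
    have hdropiff : ∀ t : List Char, (fp.toList.drop i = '.'::t ↔ fp.toList.drop (i+1) = t) := by
      intro t
      rw [hdropi]
      constructor
      · intro h; exact (List.cons.injEq _ _ _ _ ▸ h).2
      · intro h; rw [h]
    have hextstr : ∀ (t : List Char) (x : String), x.toList = t →
        (fp.toList.drop (i+1) = t → PySem.Str.slice fp (some ((i : Int) + 1)) none = x) := by
      intro t x hx h
      apply String.toList_inj.mp
      rw [hext, h, hx]
    by_cases h1 : fp.toList.drop i = ['.','p','y']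
    · have hx : PySem.Str.slice fp (some ((i:Int)+1)) none = "py" :=
        hextstr ['p','y'] "py" rfl ((hdropiff _).mp h1)
      have hTs : PySem.Str.endswith fp ".py" = true := by
        rw [show PySem.Str.endswith fp ".py" = PySem.Chars.endswith fp.toList ['.','p','y'] from rfl]
        exact hT ['p','y'] (by decide) h1
      have hstem : PySem.Str.slice fp none (some (-(PySem.Str.len ".py" : Int)))
          = PySem.Str.slice fp none (some (i : Int)) := by
        rw [show (-(PySem.Str.len ".py" : Int)) = (-3 : Int) from rfl]
        exact pvStemEq fp i 3 (by norm_num) (by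
          have hl := congrArg List.length h1
          rw [List.length_drop] at hl
          simp only [List.length_cons, List.length_nil] at hl
          omega)
      rw [pvLoopTrue fp ".py" _ hTs, pvStepAlt fp ".py" _ hstem, hx,
        if_neg (show ¬(("." : String) = "" ∨ ("py" : String) ∉ (["py","tsx","ts","jsx","js"] : List String)) by simp)]
    · by_cases h2 : fp.toList.drop i = ['.','t','s','x']
      · have hx : PySem.Str.slice fp (some ((i:Int)+1)) none = "tsx" :=
          hextstr ['t','s','x'] "tsx" rfl ((hdropiff _).mp h2)
        have hF1 : PySem.Str.endswith fp ".py" = false := by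
          rw [show PySem.Str.endswith fp ".py" = PySem.Chars.endswith fp.toList ['.','p','y'] from rfl]
          exact hF ['p','y'] (by decide) h1
        have hTs : PySem.Str.endswith fp ".tsx" = true := by
          rw [show PySem.Str.endswith fp ".tsx" = PySem.Chars.endswith fp.toList ['.','t','s','x'] from rfl]
          exact hT ['t','s','x'] (by decide) h2
        have hstem : PySem.Str.slice fp none (some (-(PySem.Str.len ".tsx" : Int)))
            = PySem.Str.slice fp none (some (i : Int)) := by
          rw [show (-(PySem.Str.len ".tsx" : Int)) = (-4 : Int) from rfl]
          exact pvStemEq fp i 4 (by norm_num) (by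
            have hl := congrArg List.length h2
            rw [List.length_drop] at hl
            simp only [List.length_cons, List.length_nil] at hl
            omega)
        rw [pvLoopFalse fp ".py" _ hF1, pvLoopTrue fp ".tsx" _ hTs, pvStepAlt fp ".tsx" _ hstem, hx,
          if_neg (show ¬(("." : String) = "" ∨ ("tsx" : String) ∉ (["py","tsx","ts","jsx","js"] : List String)) by simp)]
      · have hF1 : PySem.Str.endswith fp ".py" = false := by
          rw [show PySem.Str.endswith fp ".py" = PySem.Chars.endswith fp.toList ['.','p','y'] from rfl]
          exact hF ['p','y'] (by decide) h1
        have hF2 : PySem.Str.endswith fp ".tsx" = false := by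
          rw [show PySem.Str.endswith fp ".tsx" = PySem.Chars.endswith fp.toList ['.','t','s','x'] from rfl]
          exact hF ['t','s','x'] (by decide) h2
        by_cases h3 : fp.toList.drop i = ['.','t','s']
        · have hx : PySem.Str.slice fp (some ((i:Int)+1)) none = "ts" :=
            hextstr ['t','s'] "ts" rfl ((hdropiff _).mp h3)
          have hTs : PySem.Str.endswith fp ".ts" = true := by
            rw [show PySem.Str.endswith fp ".ts" = PySem.Chars.endswith fp.toList ['.','t','s'] from rfl]
            exact hT ['t','s'] (by decide) h3
          have hstem : PySem.Str.slice fp none (some (-(PySem.Str.len ".ts" : Int)))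
              = PySem.Str.slice fp none (some (i : Int)) := by
            rw [show (-(PySem.Str.len ".ts" : Int)) = (-3 : Int) from rfl]
            exact pvStemEq fp i 3 (by norm_num) (by
              have hl := congrArg List.length h3
              rw [List.length_drop] at hl
              simp only [List.length_cons, List.length_nil] at hl
              omega)
          rw [pvLoopFalse fp ".py" _ hF1, pvLoopFalse fp ".tsx" _ hF2,
            pvLoopTrue fp ".ts" _ hTs, pvStepAlt fp ".ts" _ hstem, hx,
            if_neg (show ¬(("." : String) = "" ∨ ("ts" : String) ∉ (["py","tsx","ts","jsx","js"] : List String)) by simp)]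
        · have hF3 : PySem.Str.endswith fp ".ts" = false := by
            rw [show PySem.Str.endswith fp ".ts" = PySem.Chars.endswith fp.toList ['.','t','s'] from rfl]
            exact hF ['t','s'] (by decide) h3
          by_cases h4 : fp.toList.drop i = ['.','j','s','x']
          · have hx : PySem.Str.slice fp (some ((i:Int)+1)) none = "jsx" :=
              hextstr ['j','s','x'] "jsx" rfl ((hdropiff _).mp h4)
            have hTs : PySem.Str.endswith fp ".jsx" = true := by
              rw [show PySem.Str.endswith fp ".jsx" = PySem.Chars.endswith fp.toList ['.','j','s','x'] from rfl]
              exact hT ['j','s','x'] (by decide) h4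
            have hstem : PySem.Str.slice fp none (some (-(PySem.Str.len ".jsx" : Int)))
                = PySem.Str.slice fp none (some (i : Int)) := by
              rw [show (-(PySem.Str.len ".jsx" : Int)) = (-4 : Int) from rfl]
              exact pvStemEq fp i 4 (by norm_num) (by
                have hl := congrArg List.length h4
                rw [List.length_drop] at hl
                simp only [List.length_cons, List.length_nil] at hl
                omega)
            rw [pvLoopFalse fp ".py" _ hF1, pvLoopFalse fp ".tsx" _ hF2,
              pvLoopFalse fp ".ts" _ hF3, pvLoopTrue fp ".jsx" _ hTs,
              pvStepAlt fp ".jsx" _ hstem, hx,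
              if_neg (show ¬(("." : String) = "" ∨ ("jsx" : String) ∉ (["py","tsx","ts","jsx","js"] : List String)) by simp)]
          · have hF4 : PySem.Str.endswith fp ".jsx" = false := by
              rw [show PySem.Str.endswith fp ".jsx" = PySem.Chars.endswith fp.toList ['.','j','s','x'] from rfl]
              exact hF ['j','s','x'] (by decide) h4
            by_cases h5 : fp.toList.drop i = ['.','j','s']
            · have hx : PySem.Str.slice fp (some ((i:Int)+1)) none = "js" :=
                hextstr ['j','s'] "js" rfl ((hdropiff _).mp h5)
              have hTs : PySem.Str.endswith fp ".js" = true := by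
                rw [show PySem.Str.endswith fp ".js" = PySem.Chars.endswith fp.toList ['.','j','s'] from rfl]
                exact hT ['j','s'] (by decide) h5
              have hstem : PySem.Str.slice fp none (some (-(PySem.Str.len ".js" : Int)))
                  = PySem.Str.slice fp none (some (i : Int)) := by
                rw [show (-(PySem.Str.len ".js" : Int)) = (-3 : Int) from rfl]
                exact pvStemEq fp i 3 (by norm_num) (by
                  have hl := congrArg List.length h5
                  rw [List.length_drop] at hl
                  simp only [List.length_cons, List.length_nil] at hl
                  omega)
              rw [pvLoopFalse fp ".py" _ hF1, pvLoopFalse fp ".tsx" _ hF2,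
                pvLoopFalse fp ".ts" _ hF3, pvLoopFalse fp ".jsx" _ hF4,
                pvLoopTrue fp ".js" _ hTs, pvStepAlt fp ".js" _ hstem, hx,
                if_neg (show ¬(("." : String) = "" ∨ ("js" : String) ∉ (["py","tsx","ts","jsx","js"] : List String)) by simp)]
            · -- no recognised extension: the tail after the last dot is none of the five names
              have hF5 : PySem.Str.endswith fp ".js" = false := by
                rw [show PySem.Str.endswith fp ".js" = PySem.Chars.endswith fp.toList ['.','j','s'] from rfl]
                exact hF ['j','s'] (by decide) h5
              have hnot : (PySem.Str.slice fp (some ((i:Int)+1)) none)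
                  ∉ (["py", "tsx", "ts", "jsx", "js"] : List String) := by
                intro hmem'
                simp only [List.mem_cons, List.not_mem_nil, or_false] at hmem'
                rcases hmem' with h | h | h | h | h
                · exact h1 ((hdropiff _).mpr (by rw [← hext, h]; rfl))
                · exact h2 ((hdropiff _).mpr (by rw [← hext, h]; rfl))
                · exact h3 ((hdropiff _).mpr (by rw [← hext, h]; rfl))
                · exact h4 ((hdropiff _).mpr (by rw [← hext, h]; rfl))
                · exact h5 ((hdropiff _).mpr (by rw [← hext, h]; rfl))
              rw [pvLoopFalse fp ".py" _ hF1, pvLoopFalse fp ".tsx" _ hF2,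
                pvLoopFalse fp ".ts" _ hF3, pvLoopFalse fp ".jsx" _ hF4,
                pvLoopFalse fp ".js" _ hF5, if_pos (Or.inr hnot)]
              rfl
  · -- no dot anywhere: both return none
    rcases pvRfindGo_spec fp.toList ['.'] fp.toList.length with ⟨hneg, _⟩ | ⟨m, _, _, hm, _⟩
    · rw [pvAltNoDot fp (hr.trans hneg)]
      have hfalse : ∀ t : List Char, '.' ∈ t → PySem.Chars.endswith fp.toList t = false := by
        intro t ht
        rw [Bool.eq_false_iff]
        intro htrue
        rw [PySem.Chars.endswith_iff] at htrue
        exact hmem (htrue.subset ht)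
      rw [pvLoopFalse fp ".py" _ (by
          rw [show PySem.Str.endswith fp ".py" = PySem.Chars.endswith fp.toList ['.','p','y'] from rfl]
          exact hfalse ['.','p','y'] (by decide)),
        pvLoopFalse fp ".tsx" _ (by
          rw [show PySem.Str.endswith fp ".tsx" = PySem.Chars.endswith fp.toList ['.','t','s','x'] from rfl]
          exact hfalse ['.','t','s','x'] (by decide)),
        pvLoopFalse fp ".ts" _ (by
          rw [show PySem.Str.endswith fp ".ts" = PySem.Chars.endswith fp.toList ['.','t','s'] from rfl]
          exact hfalse ['.','t','s'] (by decide)),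
        pvLoopFalse fp ".jsx" _ (by
          rw [show PySem.Str.endswith fp ".jsx" = PySem.Chars.endswith fp.toList ['.','j','s','x'] from rfl]
          exact hfalse ['.','j','s','x'] (by decide)),
        pvLoopFalse fp ".js" _ (by
          rw [show PySem.Str.endswith fp ".js" = PySem.Chars.endswith fp.toList ['.','j','s'] from rfl]
          exact hfalse ['.','j','s'] (by decide))]
      rfl
    · exact absurd (hm.subset (List.mem_singleton_self _)) (fun h => hmem (List.mem_of_mem_drop h))
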